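-- pv_equiv track=rewrite | github.com/apostolovbg/devcovenant | devcovenant/core/metadata_normalizer.py | _role_from_key
-- ===== SOURCE A (Python) =====
-- from typing import Dict, Iterable, List, Sequence, Tuple
--
-- _ROLE_SUFFIXES: Tuple[str, ...] = ("globs", "files", "dirs")
--
-- _LEGACY_SUFFIXES: Tuple[str, ...] = ("prefixes", "suffixes")
--
-- _LEGACY_ROLE_KEY = {
--     "guarded_paths": ("guarded", "globs"),
--     "user_visible_files": ("user_visible", "files"),
--     "user_visible_prefixes": ("user_visible", "dirs"),
--     "user_visible_globs": ("user_visible", "globs"),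
--     "user_visible_dirs": ("user_visible", "dirs"),
--     "user_facing_files": ("user_facing", "files"),
--     "user_facing_prefixes": ("user_facing", "dirs"),
--     "user_facing_globs": ("user_facing", "globs"),
--     "user_facing_dirs": ("user_facing", "dirs"),
--     "user_facing_suffixes": ("user_facing", "globs"),
--     "user_facing_exclude_prefixes": ("user_facing_exclude", "dirs"),
--     "user_facing_exclude_globs": ("user_facing_exclude", "globs"),
--     "user_facing_exclude_suffixes": ("user_facing_exclude", "globs"),
--     "doc_quality_files": ("doc_quality", "files"),
--     "doc_quality_globs": ("doc_quality", "globs"),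
--     "doc_quality_dirs": ("doc_quality", "dirs"),
-- }
--
-- def _role_from_key(key: str) -> Tuple[str, str] | None:
--     """Return (role, target) for selector-ish metadata keys."""
--     if key in _LEGACY_ROLE_KEY:
--         return _LEGACY_ROLE_KEY[key]
--     for suffix in _ROLE_SUFFIXES:
--         marker = f"_{suffix}"
--         if key.endswith(marker):
--             return key[: -len(marker)], suffix
--     for legacy in _LEGACY_SUFFIXES:
--         marker = f"_{legacy}"
--         if key.endswith(marker):
--             return key[: -len(marker)], "globs"
--     return None
-- ===== SOURCE B (Python) =====
-- _LEGACY_ROLE_KEY = {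
--     "guarded_paths": ("guarded", "globs"),
--     "user_visible_files": ("user_visible", "files"),
--     "user_visible_prefixes": ("user_visible", "dirs"),
--     "user_visible_globs": ("user_visible", "globs"),
--     "user_visible_dirs": ("user_visible", "dirs"),
--     "user_facing_files": ("user_facing", "files"),
--     "user_facing_prefixes": ("user_facing", "dirs"),
--     "user_facing_globs": ("user_facing", "globs"),
--     "user_facing_dirs": ("user_facing", "dirs"),
--     "user_facing_suffixes": ("user_facing", "globs"),
--     "user_facing_exclude_prefixes": ("user_facing_exclude", "dirs"),
--     "user_facing_exclude_globs": ("user_facing_exclude", "globs"),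
--     "user_facing_exclude_suffixes": ("user_facing_exclude", "globs"),
--     "doc_quality_files": ("doc_quality", "files"),
--     "doc_quality_globs": ("doc_quality", "globs"),
--     "doc_quality_dirs": ("doc_quality", "dirs"),
-- }
--
-- # Trie automaton over the key read right-to-left: states are ints, transitions a
-- # flat (state, char) -> state table built from the reversed markers
-- # "_globs", "_files", "_dirs", "_prefixes", "_suffixes"; accepting states carry a target.
-- _DELTA = {
--     (0, 's'): 1,
--     (1, 'b'): 2, (2, 'o'): 3, (3, 'l'): 4, (4, 'g'): 5, (5, '_'): 6,
--     (1, 'r'): 20, (20, 'i'): 21, (21, 'd'): 22, (22, '_'): 23,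
--     (1, 'e'): 10,
--     (10, 'l'): 11, (11, 'i'): 12, (12, 'f'): 13, (13, '_'): 14,
--     (10, 'x'): 30, (30, 'i'): 31, (31, 'f'): 32,
--     (32, 'e'): 33, (33, 'r'): 34, (34, 'p'): 35, (35, '_'): 36,
--     (32, 'f'): 40, (40, 'u'): 41, (41, 's'): 42, (42, '_'): 43,
-- }
-- _ACCEPT = {6: 'globs', 14: 'files', 23: 'dirs', 36: 'globs', 43: 'globs'}
--
-- def _role_from_key(key):
--     """Return (role, target) for selector-ish metadata keys."""
--     hit = _LEGACY_ROLE_KEY.get(key)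
--     if hit is not None:
--         return hit
--     state = 0
--     for i in range(len(key) - 1, -1, -1):
--         state = _DELTA.get((state, key[i]))
--         if state is None:
--             return None
--         tgt = _ACCEPT.get(state)
--         if tgt is not None:
--             return key[:i], tgt
--     return None
-- ===== Notes on version B (the rewrite author's own statement) =====
-- stated objective: alternative
-- what changed: Replaces the two endswith-scanning suffix loops by a single right-to-left character walk of the key through a flat trie automaton ((state,char)->state table built from the reversed markers) that returns at an accepting state.
import Mathlib
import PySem

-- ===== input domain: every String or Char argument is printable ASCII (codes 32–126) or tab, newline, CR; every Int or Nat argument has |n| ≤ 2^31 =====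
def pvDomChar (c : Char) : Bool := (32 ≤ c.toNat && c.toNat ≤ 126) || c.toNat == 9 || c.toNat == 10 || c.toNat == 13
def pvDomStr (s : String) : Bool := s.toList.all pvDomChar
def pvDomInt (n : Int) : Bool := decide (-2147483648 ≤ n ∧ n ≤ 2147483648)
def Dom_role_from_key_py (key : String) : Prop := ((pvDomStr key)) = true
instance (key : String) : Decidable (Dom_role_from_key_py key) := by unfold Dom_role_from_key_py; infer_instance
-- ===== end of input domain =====

-- B replaces A's two endswith-scanning loops by one right-to-left walk of the key through a flat trie automaton of the reversed suffix markers (alternative algorithm; same cost).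

-- ===== PORT A =====
def pvLegacy : PySem.Dict String (String × String) :=
  PySem.Dict.mk
  [("guarded_paths", ("guarded", "globs")),
   ("user_visible_files", ("user_visible", "files")),
   ("user_visible_prefixes", ("user_visible", "dirs")),
   ("user_visible_globs", ("user_visible", "globs")),
   ("user_visible_dirs", ("user_visible", "dirs")),
   ("user_facing_files", ("user_facing", "files")),
   ("user_facing_prefixes", ("user_facing", "dirs")),
   ("user_facing_globs", ("user_facing", "globs")),
   ("user_facing_dirs", ("user_facing", "dirs")),
   ("user_facing_suffixes", ("user_facing", "globs")),
   ("user_facing_exclude_prefixes", ("user_facing_exclude", "dirs")),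
   ("user_facing_exclude_globs", ("user_facing_exclude", "globs")),
   ("user_facing_exclude_suffixes", ("user_facing_exclude", "globs")),
   ("doc_quality_files", ("doc_quality", "files")),
   ("doc_quality_globs", ("doc_quality", "globs")),
   ("doc_quality_dirs", ("doc_quality", "dirs"))]

-- first loop of A: 'for suffix in _ROLE_SUFFIXES: … return key[:-len(marker)], suffix'
def pvLoopRole (kl : List Char) : List String → Option (String × String)
  | [] => none
  | s :: rest =>
    let marker := '_' :: s.toList
    if PySem.Chars.endswith kl marker then
      some (String.ofList (PySem.Chars.slice kl none (some (-(marker.length : Int)))), s)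
    else pvLoopRole kl rest

-- second loop of A: 'for legacy in _LEGACY_SUFFIXES: … return key[:-len(marker)], "globs"'
def pvLoopLegacy (kl : List Char) : List String → Option (String × String)
  | [] => none
  | s :: rest =>
    let marker := '_' :: s.toList
    if PySem.Chars.endswith kl marker then
      some (String.ofList (PySem.Chars.slice kl none (some (-(marker.length : Int)))), "globs")
    else pvLoopLegacy kl rest

def role_from_key_py (key : String) : Option (String × String) :=
  match PySem.Dict.get? pvLegacy key with
  | some v => some v
  | none =>
    match pvLoopRole key.toList ["globs", "files", "dirs"] with
    | some v => some v
    | none => pvLoopLegacy key.toList ["prefixes", "suffixes"]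

-- ===== PORT B =====
-- _DELTA: flat (state, char) -> state transition table of the reversed-marker trie automaton
def pvDeltaD : PySem.Dict (Int × Char) Int :=
  PySem.Dict.mk
  [((0, 's'), 1),
   ((1, 'b'), 2), ((2, 'o'), 3), ((3, 'l'), 4), ((4, 'g'), 5), ((5, '_'), 6),
   ((1, 'r'), 20), ((20, 'i'), 21), ((21, 'd'), 22), ((22, '_'), 23),
   ((1, 'e'), 10),
   ((10, 'l'), 11), ((11, 'i'), 12), ((12, 'f'), 13), ((13, '_'), 14),
   ((10, 'x'), 30), ((30, 'i'), 31), ((31, 'f'), 32),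
   ((32, 'e'), 33), ((33, 'r'), 34), ((34, 'p'), 35), ((35, '_'), 36),
   ((32, 'f'), 40), ((40, 'u'), 41), ((41, 's'), 42), ((42, '_'), 43)]

-- _ACCEPT: accepting state -> target
def pvAcceptD : PySem.Dict Int String :=
  PySem.Dict.mk [(6, "globs"), (14, "files"), (23, "dirs"), (36, "globs"), (43, "globs")]

-- the 'for i in range(len(key)-1, -1, -1)' loop of B: walk the reversed key through the automaton
def pvWalk (key : List Char) : Int → List Char → Int → Option (String × String)
  | _, [], _ => none
  | state, c :: rest, i =>
    match PySem.Dict.get? pvDeltaD (state, c) with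
    | none => none
    | some s' =>
      match PySem.Dict.get? pvAcceptD s' with
      | some tgt => some (String.ofList (PySem.List.slice key none (some i)), tgt)
      | none => pvWalk key s' rest (i - 1)

def role_from_key_py_alt (key : String) : Option (String × String) :=
  match PySem.Dict.get? pvLegacy key with
  | some v => some v
  | none => pvWalk key.toList 0 key.toList.reverse ((key.toList.length : Int) - 1)

-- ===== PRECONDITION & SPEC =====
def Spec_role_from_key_py (key : String) (out : Option (String × String)) : Prop := out = role_from_key_py_alt key
instance (key : String) (out : Option (String × String)) : Decidable (Spec_role_from_key_py key out) := by unfold Spec_role_from_key_py; infer_instance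

-- ===== CLAIM (what is proved, stated in full; the proofs are below) =====
def Claim_equal_role_from_key_py : Prop := ∀ (key : String), Dom_role_from_key_py key → Spec_role_from_key_py key (role_from_key_py key)

-- ===== LEMMAS AND PROOFS =====

-- one unfolding step of pvWalk, split by the transition/accept lookups
theorem walk_step_none (key : List Char) (st : Int) (c : Char) (rest : List Char) (i : Int)
    (h1 : PySem.Dict.get? pvDeltaD (st, c) = none) : pvWalk key st (c :: rest) i = none := by
  simp only [pvWalk, h1]

theorem walk_step_go (key : List Char) (st : Int) (c : Char) (rest : List Char) (i : Int) (s' : Int)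
    (h1 : PySem.Dict.get? pvDeltaD (st, c) = some s')
    (h2 : PySem.Dict.get? pvAcceptD s' = none) :
    pvWalk key st (c :: rest) i = pvWalk key s' rest (i - 1) := by
  simp only [pvWalk, h1, h2]

theorem walk_step_acc (key : List Char) (st : Int) (c : Char) (rest : List Char) (i : Int) (s' : Int) (tgt : String)
    (h1 : PySem.Dict.get? pvDeltaD (st, c) = some s')
    (h2 : PySem.Dict.get? pvAcceptD s' = some tgt) :
    pvWalk key st (c :: rest) i = some (String.ofList (PySem.List.slice key none (some i)), tgt) := by
  simp only [pvWalk, h1, h2]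

-- missing-transition facts for each automaton state, for an arbitrary character
theorem dn0 (c : Char) (h : ¬ c = 's') : PySem.Dict.get? pvDeltaD (0, c) = none := by
  simp [pvDeltaD, PySem.Dict.get?, Ne.symm h]
theorem dn1 (c : Char) (hb : ¬ c = 'b') (hr : ¬ c = 'r') (he : ¬ c = 'e') :
    PySem.Dict.get? pvDeltaD (1, c) = none := by
  simp [pvDeltaD, PySem.Dict.get?, Ne.symm hb, Ne.symm hr, Ne.symm he]
theorem dn2 (c : Char) (h : ¬ c = 'o') : PySem.Dict.get? pvDeltaD (2, c) = none := by
  simp [pvDeltaD, PySem.Dict.get?, Ne.symm h]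
theorem dn3 (c : Char) (h : ¬ c = 'l') : PySem.Dict.get? pvDeltaD (3, c) = none := by
  simp [pvDeltaD, PySem.Dict.get?, Ne.symm h]
theorem dn4 (c : Char) (h : ¬ c = 'g') : PySem.Dict.get? pvDeltaD (4, c) = none := by
  simp [pvDeltaD, PySem.Dict.get?, Ne.symm h]
theorem dn5 (c : Char) (h : ¬ c = '_') : PySem.Dict.get? pvDeltaD (5, c) = none := by
  simp [pvDeltaD, PySem.Dict.get?, Ne.symm h]
theorem dn10 (c : Char) (hl : ¬ c = 'l') (hx : ¬ c = 'x') : PySem.Dict.get? pvDeltaD (10, c) = none := by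
  simp [pvDeltaD, PySem.Dict.get?, Ne.symm hl, Ne.symm hx]
theorem dn11 (c : Char) (h : ¬ c = 'i') : PySem.Dict.get? pvDeltaD (11, c) = none := by
  simp [pvDeltaD, PySem.Dict.get?, Ne.symm h]
theorem dn12 (c : Char) (h : ¬ c = 'f') : PySem.Dict.get? pvDeltaD (12, c) = none := by
  simp [pvDeltaD, PySem.Dict.get?, Ne.symm h]
theorem dn13 (c : Char) (h : ¬ c = '_') : PySem.Dict.get? pvDeltaD (13, c) = none := by
  simp [pvDeltaD, PySem.Dict.get?, Ne.symm h]
theorem dn20 (c : Char) (h : ¬ c = 'i') : PySem.Dict.get? pvDeltaD (20, c) = none := by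
  simp [pvDeltaD, PySem.Dict.get?, Ne.symm h]
theorem dn21 (c : Char) (h : ¬ c = 'd') : PySem.Dict.get? pvDeltaD (21, c) = none := by
  simp [pvDeltaD, PySem.Dict.get?, Ne.symm h]
theorem dn22 (c : Char) (h : ¬ c = '_') : PySem.Dict.get? pvDeltaD (22, c) = none := by
  simp [pvDeltaD, PySem.Dict.get?, Ne.symm h]
theorem dn30 (c : Char) (h : ¬ c = 'i') : PySem.Dict.get? pvDeltaD (30, c) = none := by
  simp [pvDeltaD, PySem.Dict.get?, Ne.symm h]
theorem dn31 (c : Char) (h : ¬ c = 'f') : PySem.Dict.get? pvDeltaD (31, c) = none := by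
  simp [pvDeltaD, PySem.Dict.get?, Ne.symm h]
theorem dn32 (c : Char) (he : ¬ c = 'e') (hf : ¬ c = 'f') : PySem.Dict.get? pvDeltaD (32, c) = none := by
  simp [pvDeltaD, PySem.Dict.get?, Ne.symm he, Ne.symm hf]
theorem dn33 (c : Char) (h : ¬ c = 'r') : PySem.Dict.get? pvDeltaD (33, c) = none := by
  simp [pvDeltaD, PySem.Dict.get?, Ne.symm h]
theorem dn34 (c : Char) (h : ¬ c = 'p') : PySem.Dict.get? pvDeltaD (34, c) = none := by
  simp [pvDeltaD, PySem.Dict.get?, Ne.symm h]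
theorem dn35 (c : Char) (h : ¬ c = '_') : PySem.Dict.get? pvDeltaD (35, c) = none := by
  simp [pvDeltaD, PySem.Dict.get?, Ne.symm h]
theorem dn40 (c : Char) (h : ¬ c = 'u') : PySem.Dict.get? pvDeltaD (40, c) = none := by
  simp [pvDeltaD, PySem.Dict.get?, Ne.symm h]
theorem dn41 (c : Char) (h : ¬ c = 's') : PySem.Dict.get? pvDeltaD (41, c) = none := by
  simp [pvDeltaD, PySem.Dict.get?, Ne.symm h]
theorem dn42 (c : Char) (h : ¬ c = '_') : PySem.Dict.get? pvDeltaD (42, c) = none := by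
  simp [pvDeltaD, PySem.Dict.get?, Ne.symm h]

-- the walk returns none when no reversed marker is a prefix of the reversed key
theorem walk_dead (key r : List Char) (i : Int)
    (hg : ¬ (['s','b','o','l','g','_'] <+: r))
    (hf : ¬ (['s','e','l','i','f','_'] <+: r))
    (hd : ¬ (['s','r','i','d','_'] <+: r))
    (hp : ¬ (['s','e','x','i','f','e','r','p','_'] <+: r))
    (hs : ¬ (['s','e','x','i','f','f','u','s','_'] <+: r)) :
    pvWalk key 0 r i = none := by
  rcases r with _ | ⟨c0, r⟩
  · rfl
  by_cases h0 : c0 = 's'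
  case neg => exact walk_step_none _ _ _ _ _ (dn0 c0 h0)
  subst h0
  rw [walk_step_go _ _ _ _ _ 1 (by decide) (by decide)]
  rcases r with _ | ⟨c1, r⟩
  · rfl
  by_cases h1b : c1 = 'b'
  · subst h1b
    rw [walk_step_go _ _ _ _ _ 2 (by decide) (by decide)]
    rcases r with _ | ⟨c2, r⟩
    · rfl
    by_cases h2 : c2 = 'o'
    case neg => exact walk_step_none _ _ _ _ _ (dn2 c2 h2)
    subst h2
    rw [walk_step_go _ _ _ _ _ 3 (by decide) (by decide)]
    rcases r with _ | ⟨c3, r⟩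
    · rfl
    by_cases h3 : c3 = 'l'
    case neg => exact walk_step_none _ _ _ _ _ (dn3 c3 h3)
    subst h3
    rw [walk_step_go _ _ _ _ _ 4 (by decide) (by decide)]
    rcases r with _ | ⟨c4, r⟩
    · rfl
    by_cases h4 : c4 = 'g'
    case neg => exact walk_step_none _ _ _ _ _ (dn4 c4 h4)
    subst h4
    rw [walk_step_go _ _ _ _ _ 5 (by decide) (by decide)]
    rcases r with _ | ⟨c5, r⟩
    · rfl
    by_cases h5 : c5 = '_'
    · subst h5; exact absurd ⟨r, rfl⟩ hg
    · exact walk_step_none _ _ _ _ _ (dn5 c5 h5)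
  by_cases h1r : c1 = 'r'
  · subst h1r
    rw [walk_step_go _ _ _ _ _ 20 (by decide) (by decide)]
    rcases r with _ | ⟨c2, r⟩
    · rfl
    by_cases h2 : c2 = 'i'
    case neg => exact walk_step_none _ _ _ _ _ (dn20 c2 h2)
    subst h2
    rw [walk_step_go _ _ _ _ _ 21 (by decide) (by decide)]
    rcases r with _ | ⟨c3, r⟩
    · rfl
    by_cases h3 : c3 = 'd'
    case neg => exact walk_step_none _ _ _ _ _ (dn21 c3 h3)
    subst h3
    rw [walk_step_go _ _ _ _ _ 22 (by decide) (by decide)]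
    rcases r with _ | ⟨c4, r⟩
    · rfl
    by_cases h4 : c4 = '_'
    · subst h4; exact absurd ⟨r, rfl⟩ hd
    · exact walk_step_none _ _ _ _ _ (dn22 c4 h4)
  by_cases h1e : c1 = 'e'
  case neg => exact walk_step_none _ _ _ _ _ (dn1 c1 h1b h1r h1e)
  subst h1e
  rw [walk_step_go _ _ _ _ _ 10 (by decide) (by decide)]
  rcases r with _ | ⟨c2, r⟩
  · rfl
  by_cases h2l : c2 = 'l'
  · subst h2l
    rw [walk_step_go _ _ _ _ _ 11 (by decide) (by decide)]
    rcases r with _ | ⟨c3, r⟩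
    · rfl
    by_cases h3 : c3 = 'i'
    case neg => exact walk_step_none _ _ _ _ _ (dn11 c3 h3)
    subst h3
    rw [walk_step_go _ _ _ _ _ 12 (by decide) (by decide)]
    rcases r with _ | ⟨c4, r⟩
    · rfl
    by_cases h4 : c4 = 'f'
    case neg => exact walk_step_none _ _ _ _ _ (dn12 c4 h4)
    subst h4
    rw [walk_step_go _ _ _ _ _ 13 (by decide) (by decide)]
    rcases r with _ | ⟨c5, r⟩
    · rfl
    by_cases h5 : c5 = '_'
    · subst h5; exact absurd ⟨r, rfl⟩ hf
    · exact walk_step_none _ _ _ _ _ (dn13 c5 h5)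
  by_cases h2x : c2 = 'x'
  case neg => exact walk_step_none _ _ _ _ _ (dn10 c2 h2l h2x)
  subst h2x
  rw [walk_step_go _ _ _ _ _ 30 (by decide) (by decide)]
  rcases r with _ | ⟨c3, r⟩
  · rfl
  by_cases h3 : c3 = 'i'
  case neg => exact walk_step_none _ _ _ _ _ (dn30 c3 h3)
  subst h3
  rw [walk_step_go _ _ _ _ _ 31 (by decide) (by decide)]
  rcases r with _ | ⟨c4, r⟩
  · rfl
  by_cases h4 : c4 = 'f'
  case neg => exact walk_step_none _ _ _ _ _ (dn31 c4 h4)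
  subst h4
  rw [walk_step_go _ _ _ _ _ 32 (by decide) (by decide)]
  rcases r with _ | ⟨c5, r⟩
  · rfl
  by_cases h5e : c5 = 'e'
  · subst h5e
    rw [walk_step_go _ _ _ _ _ 33 (by decide) (by decide)]
    rcases r with _ | ⟨c6, r⟩
    · rfl
    by_cases h6 : c6 = 'r'
    case neg => exact walk_step_none _ _ _ _ _ (dn33 c6 h6)
    subst h6
    rw [walk_step_go _ _ _ _ _ 34 (by decide) (by decide)]
    rcases r with _ | ⟨c7, r⟩
    · rfl
    by_cases h7 : c7 = 'p'
    case neg => exact walk_step_none _ _ _ _ _ (dn34 c7 h7)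
    subst h7
    rw [walk_step_go _ _ _ _ _ 35 (by decide) (by decide)]
    rcases r with _ | ⟨c8, r⟩
    · rfl
    by_cases h8 : c8 = '_'
    · subst h8; exact absurd ⟨r, rfl⟩ hp
    · exact walk_step_none _ _ _ _ _ (dn35 c8 h8)
  by_cases h5f : c5 = 'f'
  case neg => exact walk_step_none _ _ _ _ _ (dn32 c5 h5e h5f)
  subst h5f
  rw [walk_step_go _ _ _ _ _ 40 (by decide) (by decide)]
  rcases r with _ | ⟨c6, r⟩
  · rfl
  by_cases h6 : c6 = 'u'
  case neg => exact walk_step_none _ _ _ _ _ (dn40 c6 h6)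
  subst h6
  rw [walk_step_go _ _ _ _ _ 41 (by decide) (by decide)]
  rcases r with _ | ⟨c7, r⟩
  · rfl
  by_cases h7 : c7 = 's'
  case neg => exact walk_step_none _ _ _ _ _ (dn41 c7 h7)
  subst h7
  rw [walk_step_go _ _ _ _ _ 42 (by decide) (by decide)]
  rcases r with _ | ⟨c8, r⟩
  · rfl
  by_cases h8 : c8 = '_'
  · subst h8; exact absurd ⟨r, rfl⟩ hs
  · exact walk_step_none _ _ _ _ _ (dn42 c8 h8)

theorem take_head (h m : List Char) (i : Int) (hi : i = (h.length : Int)) :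
    PySem.List.slice (h ++ m) none (some i) = h := by
  subst hi
  rw [PySem.List.slice_to_natCast]
  simp


theorem slice_neg5 (h m : List Char) (hm : m.length = 5) :
    PySem.List.slice (h ++ m) none (some (-5)) = h := by
  rw [PySem.List.slice_to_neg_ofNat _ 5 (by norm_num)]
  simp [hm]

theorem slice_neg6 (h m : List Char) (hm : m.length = 6) :
    PySem.List.slice (h ++ m) none (some (-6)) = h := by
  rw [PySem.List.slice_to_neg_ofNat _ 6 (by norm_num)]
  simp [hm]

theorem slice_neg9 (h m : List Char) (hm : m.length = 9) :
    PySem.List.slice (h ++ m) none (some (-9)) = h := by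
  rw [PySem.List.slice_to_neg_ofNat _ 9 (by norm_num)]
  simp [hm]

theorem walk_globs (h : List Char) :
    pvWalk (h ++ ['_','g','l','o','b','s']) 0 ('s'::'b'::'o'::'l'::'g'::'_'::h.reverse) ((h.length : Int) + 6 - 1) = some (String.ofList h, "globs") := by
  rw [walk_step_go _ _ _ _ _ 1 (by decide) (by decide),
      walk_step_go _ _ _ _ _ 2 (by decide) (by decide),
      walk_step_go _ _ _ _ _ 3 (by decide) (by decide),
      walk_step_go _ _ _ _ _ 4 (by decide) (by decide),
      walk_step_go _ _ _ _ _ 5 (by decide) (by decide),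
      walk_step_acc _ _ _ _ _ 6 "globs" (by decide) (by decide),
      take_head h _ _ (by ring)]

theorem walk_files (h : List Char) :
    pvWalk (h ++ ['_','f','i','l','e','s']) 0 ('s'::'e'::'l'::'i'::'f'::'_'::h.reverse) ((h.length : Int) + 6 - 1) = some (String.ofList h, "files") := by
  rw [walk_step_go _ _ _ _ _ 1 (by decide) (by decide),
      walk_step_go _ _ _ _ _ 10 (by decide) (by decide),
      walk_step_go _ _ _ _ _ 11 (by decide) (by decide),
      walk_step_go _ _ _ _ _ 12 (by decide) (by decide),
      walk_step_go _ _ _ _ _ 13 (by decide) (by decide),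
      walk_step_acc _ _ _ _ _ 14 "files" (by decide) (by decide),
      take_head h _ _ (by ring)]

theorem walk_dirs (h : List Char) :
    pvWalk (h ++ ['_','d','i','r','s']) 0 ('s'::'r'::'i'::'d'::'_'::h.reverse) ((h.length : Int) + 5 - 1) = some (String.ofList h, "dirs") := by
  rw [walk_step_go _ _ _ _ _ 1 (by decide) (by decide),
      walk_step_go _ _ _ _ _ 20 (by decide) (by decide),
      walk_step_go _ _ _ _ _ 21 (by decide) (by decide),
      walk_step_go _ _ _ _ _ 22 (by decide) (by decide),
      walk_step_acc _ _ _ _ _ 23 "dirs" (by decide) (by decide),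
      take_head h _ _ (by ring)]

theorem walk_prefixes (h : List Char) :
    pvWalk (h ++ ['_','p','r','e','f','i','x','e','s']) 0 ('s'::'e'::'x'::'i'::'f'::'e'::'r'::'p'::'_'::h.reverse) ((h.length : Int) + 9 - 1) = some (String.ofList h, "globs") := by
  rw [walk_step_go _ _ _ _ _ 1 (by decide) (by decide),
      walk_step_go _ _ _ _ _ 10 (by decide) (by decide),
      walk_step_go _ _ _ _ _ 30 (by decide) (by decide),
      walk_step_go _ _ _ _ _ 31 (by decide) (by decide),
      walk_step_go _ _ _ _ _ 32 (by decide) (by decide),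
      walk_step_go _ _ _ _ _ 33 (by decide) (by decide),
      walk_step_go _ _ _ _ _ 34 (by decide) (by decide),
      walk_step_go _ _ _ _ _ 35 (by decide) (by decide),
      walk_step_acc _ _ _ _ _ 36 "globs" (by decide) (by decide),
      take_head h _ _ (by ring)]

theorem walk_suffixes (h : List Char) :
    pvWalk (h ++ ['_','s','u','f','f','i','x','e','s']) 0 ('s'::'e'::'x'::'i'::'f'::'f'::'u'::'s'::'_'::h.reverse) ((h.length : Int) + 9 - 1) = some (String.ofList h, "globs") := by
  rw [walk_step_go _ _ _ _ _ 1 (by decide) (by decide),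
      walk_step_go _ _ _ _ _ 10 (by decide) (by decide),
      walk_step_go _ _ _ _ _ 30 (by decide) (by decide),
      walk_step_go _ _ _ _ _ 31 (by decide) (by decide),
      walk_step_go _ _ _ _ _ 32 (by decide) (by decide),
      walk_step_go _ _ _ _ _ 40 (by decide) (by decide),
      walk_step_go _ _ _ _ _ 41 (by decide) (by decide),
      walk_step_go _ _ _ _ _ 42 (by decide) (by decide),
      walk_step_acc _ _ _ _ _ 43 "globs" (by decide) (by decide),
      take_head h _ _ (by ring)]

theorem not_pre_of_not_endswith (kl m : List Char)
    (he : ¬ PySem.Chars.endswith kl m = true) : ¬ (m.reverse <+: kl.reverse) := by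
  intro hpre
  exact he ((PySem.Chars.endswith_iff _ _).mpr (List.reverse_prefix.mp (by simpa using hpre)))

theorem walk_chain (kl : List Char) :
    (match pvLoopRole kl ["globs", "files", "dirs"] with
     | some v => some v
     | none => pvLoopLegacy kl ["prefixes", "suffixes"]) =
    pvWalk kl 0 kl.reverse ((kl.length : Int) - 1) := by
  by_cases e1 : PySem.Chars.endswith kl ['_','g','l','o','b','s'] = true
  · obtain ⟨h, rfl⟩ := (PySem.Chars.endswith_iff _ _).mp e1
    simp [pvLoopRole, e1, slice_neg6 h ['_','g','l','o','b','s'] (by decide), walk_globs h]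
  by_cases e2 : PySem.Chars.endswith kl ['_','f','i','l','e','s'] = true
  · obtain ⟨h, rfl⟩ := (PySem.Chars.endswith_iff _ _).mp e2
    simp [pvLoopRole, e1, e2, slice_neg6 h ['_','f','i','l','e','s'] (by decide), walk_files h]
  by_cases e3 : PySem.Chars.endswith kl ['_','d','i','r','s'] = true
  · obtain ⟨h, rfl⟩ := (PySem.Chars.endswith_iff _ _).mp e3
    simp [pvLoopRole, e1, e2, e3, slice_neg5 h ['_','d','i','r','s'] (by decide), walk_dirs h]
  by_cases e4 : PySem.Chars.endswith kl ['_','p','r','e','f','i','x','e','s'] = true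
  · obtain ⟨h, rfl⟩ := (PySem.Chars.endswith_iff _ _).mp e4
    simp [pvLoopRole, pvLoopLegacy, e1, e2, e3, e4,
      slice_neg9 h ['_','p','r','e','f','i','x','e','s'] (by decide), walk_prefixes h]
  by_cases e5 : PySem.Chars.endswith kl ['_','s','u','f','f','i','x','e','s'] = true
  · obtain ⟨h, rfl⟩ := (PySem.Chars.endswith_iff _ _).mp e5
    simp [pvLoopRole, pvLoopLegacy, e1, e2, e3, e4, e5,
      slice_neg9 h ['_','s','u','f','f','i','x','e','s'] (by decide), walk_suffixes h]
  · rw [walk_dead kl kl.reverse _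
      (by simpa using not_pre_of_not_endswith kl ['_','g','l','o','b','s'] e1)
      (by simpa using not_pre_of_not_endswith kl ['_','f','i','l','e','s'] e2)
      (by simpa using not_pre_of_not_endswith kl ['_','d','i','r','s'] e3)
      (by simpa using not_pre_of_not_endswith kl ['_','p','r','e','f','i','x','e','s'] e4)
      (by simpa using not_pre_of_not_endswith kl ['_','s','u','f','f','i','x','e','s'] e5)]
    simp [pvLoopRole, pvLoopLegacy, e1, e2, e3, e4, e5]

-- ===== VERDICT (by name: the statement is the Claim_ definition above) =====
theorem role_from_key_py_spec : Claim_equal_role_from_key_py := by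
  intro key _
  unfold Spec_role_from_key_py role_from_key_py role_from_key_py_alt
  cases PySem.Dict.get? pvLegacy key with
  | some v => rfl
  | none => exact walk_chain key.toList
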